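-- pv_equiv track=rewrite | github.com/Dybowskii/ZadanieRekrutacyjne | task2/pesel_app/utils.py | get_century_and_month
-- ===== SOURCE A (Python) =====
-- def get_century_and_month(month):
--     """Return the century and real month for a given PESEL month code."""
--     century_offsets = {
--         80: 1800,
--         0: 1900,
--         20: 2000,
--     }
--
--     for offset, century in century_offsets.items():
--         if offset < month <= offset + 12:
--             real_month = month - offset
--             return century, real_month
--
--     return None, None
-- ===== SOURCE B (Python) =====
-- def get_century_and_month(month):
--     """Return the century and real month for a given PESEL month code."""
--     group_century = {0: 1900, 1: 2000, 4: 1800}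
--     group = month // 20
--     real_month = month - group * 20
--     if group in group_century and 1 <= real_month <= 12:
--         return group_century[group], real_month
--     return None, None
-- ===== Notes on version B (the rewrite author's own statement) =====
-- stated objective: simpler
-- what changed: Replaces the loop over offset ranges with direct arithmetic: group = month // 20 and real_month = month - group*20, plus a single dict lookup keyed by the group.
import Mathlib
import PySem

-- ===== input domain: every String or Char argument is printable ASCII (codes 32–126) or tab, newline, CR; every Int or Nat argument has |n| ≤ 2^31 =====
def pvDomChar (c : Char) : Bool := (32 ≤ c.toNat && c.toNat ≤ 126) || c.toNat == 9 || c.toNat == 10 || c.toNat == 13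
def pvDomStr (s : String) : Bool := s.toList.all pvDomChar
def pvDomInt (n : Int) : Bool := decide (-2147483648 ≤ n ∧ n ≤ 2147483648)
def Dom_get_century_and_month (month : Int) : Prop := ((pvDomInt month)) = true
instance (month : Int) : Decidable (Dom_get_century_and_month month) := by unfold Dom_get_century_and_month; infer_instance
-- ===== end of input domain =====

-- B replaces A's scan over offset ranges by direct arithmetic (month // 20) and a group lookup; objective: simpler.
-- ===== PORT A =====
-- the `for offset, century in century_offsets.items()` loop, recursing over the dict's items in insertion order
def pvScanOffsets (month : Int) : List (Int × Int) → Option Int × Option Int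
  | [] => (none, none)
  | (offset, century) :: rest =>
    if offset < month ∧ month ≤ offset + 12 then (some century, some (month - offset))
    else pvScanOffsets month rest

def get_century_and_month (month : Int) : Option Int × Option Int :=
  pvScanOffsets month [(80, 1800), (0, 1900), (20, 2000)]

-- ===== PORT B =====
def get_century_and_month_alt (month : Int) : Option Int × Option Int :=
  let groupCentury : PySem.Dict Int Int := PySem.Dict.ofList [(0, 1900), (1, 2000), (4, 1800)]
  let group := PySem.Int.floordiv month 20
  let realMonth := month - group * 20
  match PySem.Dict.get? groupCentury group with
  | some century => if 1 ≤ realMonth ∧ realMonth ≤ 12 then (some century, some realMonth) else (none, none)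
  | none => (none, none)

-- ===== PRECONDITION & SPEC =====
def Spec_get_century_and_month (month : Int) (out : Option Int × Option Int) : Prop := out = get_century_and_month_alt month
instance (month : Int) (out : Option Int × Option Int) : Decidable (Spec_get_century_and_month month out) := by unfold Spec_get_century_and_month; infer_instance

-- ===== CLAIM (what is proved, stated in full; the proofs are below) =====
def Claim_equal_get_century_and_month : Prop := ∀ (month : Int), Dom_get_century_and_month month → Spec_get_century_and_month month (get_century_and_month month)

-- ===== LEMMAS AND PROOFS =====

-- ===== VERDICT (by name: the statement is the Claim_ definition above) =====
theorem get_century_and_month_spec : Claim_equal_get_century_and_month := by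
  intro month _
  unfold Spec_get_century_and_month get_century_and_month get_century_and_month_alt
  have hfd : PySem.Int.floordiv month 20 = month / 20 := by
    simp [PySem.Int.floordiv, Int.fdiv_eq_ediv]
  rw [hfd]
  by_cases h0 : month / 20 = 0
  · have hb : 0 ≤ month ∧ month ≤ 19 := by omega
    rw [h0]
    norm_num [pvScanOffsets, PySem.Dict.ofList, PySem.Dict.get?, PySem.Dict.empty, PySem.Dict.update, List.find?]
    split_ifs <;> first | rfl | (exfalso; omega)
  · by_cases h1 : month / 20 = 1
    · have hb : 20 ≤ month ∧ month ≤ 39 := by omega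
      rw [h1]
      norm_num [pvScanOffsets, PySem.Dict.ofList, PySem.Dict.get?, PySem.Dict.empty, PySem.Dict.update, List.find?]
      split_ifs <;> first | rfl | (exfalso; omega)
    · by_cases h4 : month / 20 = 4
      · have hb : 80 ≤ month ∧ month ≤ 99 := by omega
        rw [h4]
        norm_num [pvScanOffsets, PySem.Dict.ofList, PySem.Dict.get?, PySem.Dict.empty, PySem.Dict.update, List.find?]
        split_ifs <;> first | rfl | (exfalso; omega)
      · have hg : PySem.Dict.get? (PySem.Dict.ofList [((0:Int), (1900:Int)), (1, 2000), (4, 1800)]) (month / 20) = none := by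
          simp [PySem.Dict.ofList, PySem.Dict.get?, PySem.Dict.empty, PySem.Dict.update]
          intro a b hmem
          have hmem' : (a, b) ∈ [((0:Int), (1900:Int)), (1, 2000), (4, 1800)] := hmem
          simp at hmem'
          rcases hmem' with ⟨ha, _⟩ | ⟨ha, _⟩ | ⟨ha, _⟩ <;> omega
        norm_num [pvScanOffsets, hg]
        split_ifs <;> first | rfl | (exfalso; omega)
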